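-- pv_equiv track=rewrite | github.com/AADesign91/Timetable-Scheduler | main.py | build_time_slots
-- ===== SOURCE A (Python) =====
-- TIME_SLOT_MINUTES = 10
--
-- def parse_time_str(t: str):
--     """Parse 'HH:MM' into (hour, minute)."""
--     parts = (t or "").split(":")
--     if len(parts) != 2:
--         return 8, 0
--     try:
--         h = int(parts[0])
--         m = int(parts[1])
--         return h, m
--     except ValueError:
--         return 8, 0
--
-- def time_to_minutes(h: int, m: int) -> int:
--     return h * 60 + m
--
-- def minutes_to_str(total_minutes: int) -> str:
--     h = total_minutes // 60
--     m = total_minutes % 60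
--     return f"{h:02d}:{m:02d}"
--
-- def build_time_slots(workday_start: str, workday_end: str, blackouts):
--     """
--     Build list of slot start times between workday_start and workday_end,
--     in TIME_SLOT_MINUTES increments, excluding blackout windows.
--     """
--     start_h, start_m = parse_time_str(workday_start)
--     end_h, end_m = parse_time_str(workday_end)
--
--     start_minutes = time_to_minutes(start_h, start_m)
--     end_minutes = time_to_minutes(end_h, end_m)
--
--     # Safety fallback if invalid
--     if end_minutes <= start_minutes:
--         start_minutes = time_to_minutes(8, 0)
--         end_minutes = time_to_minutes(17, 0)
--
--     blackout_ranges = []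
--     for b in blackouts or []:
--         s = b.get("start")
--         e = b.get("end")
--         if not s or not e:
--             continue
--         sh, sm = parse_time_str(s)
--         eh, em = parse_time_str(e)
--         sb = time_to_minutes(sh, sm)
--         eb = time_to_minutes(eh, em)
--         if eb > sb:
--             blackout_ranges.append((sb, eb))
--
--     def in_blackout(minute_val: int) -> bool:
--         for sb, eb in blackout_ranges:
--             if sb <= minute_val < eb:
--                 return True
--         return False
--
--     slots = []
--     current = start_minutes
--     while current < end_minutes:
--         if not in_blackout(current):
--             slots.append(minutes_to_str(current))
--         current += TIME_SLOT_MINUTES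
--     return slots
-- ===== SOURCE B (Python) =====
-- TIME_SLOT_MINUTES = 10
--
-- def parse_time_str(t: str):
--     parts = (t or "").split(":")
--     if len(parts) != 2:
--         return 8, 0
--     try:
--         return int(parts[0]), int(parts[1])
--     except ValueError:
--         return 8, 0
--
-- def time_to_minutes(h: int, m: int) -> int:
--     return h * 60 + m
--
-- def minutes_to_str(total_minutes: int) -> str:
--     return f"{total_minutes // 60:02d}:{total_minutes % 60:02d}"
--
-- def build_time_slots(workday_start: str, workday_end: str, blackouts):
--     start_minutes = time_to_minutes(*parse_time_str(workday_start))
--     end_minutes = time_to_minutes(*parse_time_str(workday_end))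
--     if end_minutes <= start_minutes:
--         start_minutes, end_minutes = 8 * 60, 17 * 60
--
--     # One blocked-minute index built once (each blackout clipped to the workday),
--     # then a single comprehension over the slot grid with O(1) lookups.
--     blocked = set()
--     for b in blackouts or []:
--         s = b.get("start")
--         e = b.get("end")
--         if not s or not e:
--             continue
--         sb = time_to_minutes(*parse_time_str(s))
--         eb = time_to_minutes(*parse_time_str(e))
--         if eb > sb:
--             blocked.update(range(max(sb, start_minutes), min(eb, end_minutes)))
--
--     return [minutes_to_str(m)
--             for m in range(start_minutes, end_minutes, TIME_SLOT_MINUTES)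
--             if m not in blocked]
-- ===== Notes on version B (the rewrite author's own statement) =====
-- stated objective: idiomatic
-- what changed: Replaces the per-slot inner scan over the kept blackout ranges with a blocked-minute set built once (each range clipped to the workday and expanded), and replaces the while-loop with accumulator by a single list comprehension over range(start, end, TIME_SLOT_MINUTES) with O(1) set lookups.
import Mathlib
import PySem

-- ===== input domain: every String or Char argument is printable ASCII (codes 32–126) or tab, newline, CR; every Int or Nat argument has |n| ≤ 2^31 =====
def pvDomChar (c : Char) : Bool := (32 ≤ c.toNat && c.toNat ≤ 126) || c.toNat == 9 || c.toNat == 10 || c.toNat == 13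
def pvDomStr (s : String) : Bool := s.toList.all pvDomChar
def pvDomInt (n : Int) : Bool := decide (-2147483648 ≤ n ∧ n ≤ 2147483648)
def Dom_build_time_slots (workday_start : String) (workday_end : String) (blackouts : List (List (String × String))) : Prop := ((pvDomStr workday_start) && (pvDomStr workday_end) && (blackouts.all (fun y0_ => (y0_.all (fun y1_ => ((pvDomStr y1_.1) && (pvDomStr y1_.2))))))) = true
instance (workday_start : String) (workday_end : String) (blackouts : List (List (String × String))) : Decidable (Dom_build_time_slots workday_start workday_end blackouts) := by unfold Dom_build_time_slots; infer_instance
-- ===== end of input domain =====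

-- B builds a clipped blocked-minute set once and emits the slot grid with a single
-- filtered pass (idiomatic; removes A's per-slot inner scan over the blackout ranges).

-- ===== PORT A =====
-- shared module helpers (identical in Source A and Source B)
def TIME_SLOT_MINUTES : Int := 10

def parse_time_str (t : String) : Int × Int :=
  let parts := PySem.Chars.splitOn t.toList [':']
  if parts.length = 2 then
    match PySem.Int.ofChars? (parts.getD 0 []), PySem.Int.ofChars? (parts.getD 1 []) with
    | some h, some m => (h, m)
    | _, _ => (8, 0)
  else (8, 0)

def time_to_minutes (h : Int) (m : Int) : Int := h * 60 + m

def minutes_to_str (total_minutes : Int) : String :=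
  PySem.Str.zfill (PySem.Int.toStr (PySem.Int.floordiv total_minutes 60)) 2 ++ ":" ++
    PySem.Str.zfill (PySem.Int.toStr (PySem.Int.mod total_minutes 60)) 2

-- body of A's 'for b in blackouts' loop
def blackoutStep (acc : List (Int × Int)) (b : List (String × String)) : List (Int × Int) :=
  match b.lookup "start", b.lookup "end" with
  | some s, some e =>
    if s = "" ∨ e = "" then acc
    else
      let sb := time_to_minutes (parse_time_str s).1 (parse_time_str s).2
      let eb := time_to_minutes (parse_time_str e).1 (parse_time_str e).2
      if eb > sb then acc ++ [(sb, eb)] else acc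
  | _, _ => acc

def blackoutRanges (blackouts : List (List (String × String))) : List (Int × Int) :=
  blackouts.foldl blackoutStep []

def in_blackout (ranges : List (Int × Int)) (minute_val : Int) : Bool :=
  ranges.any (fun r => decide (r.1 ≤ minute_val) && decide (minute_val < r.2))

-- A's 'while current < end_minutes' loop
def slotLoop (ranges : List (Int × Int)) (endM : Int) (current : Int) (slots : List String) : List String :=
  if _h : current < endM then
    slotLoop ranges endM (current + TIME_SLOT_MINUTES)
      (if in_blackout ranges current then slots else slots ++ [minutes_to_str current])
  else slots
termination_by (endM - current).toNat
decreasing_by simp only [TIME_SLOT_MINUTES] at *; omega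

def build_time_slots (workday_start : String) (workday_end : String) (blackouts : List (List (String × String))) : List String :=
  let start_minutes := time_to_minutes (parse_time_str workday_start).1 (parse_time_str workday_start).2
  let end_minutes := time_to_minutes (parse_time_str workday_end).1 (parse_time_str workday_end).2
  if end_minutes ≤ start_minutes then
    slotLoop (blackoutRanges blackouts) (time_to_minutes 17 0) (time_to_minutes 8 0) []
  else
    slotLoop (blackoutRanges blackouts) end_minutes start_minutes []

-- ===== PORT B =====
-- body of B's 'for b in blackouts' loop: clip each kept range to the workday and add its minutes
def blockedStep (startM endM : Int) (acc : PySem.Set Int) (b : List (String × String)) : PySem.Set Int :=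
  match b.lookup "start", b.lookup "end" with
  | some s, some e =>
    if s = "" ∨ e = "" then acc
    else
      let sb := time_to_minutes (parse_time_str s).1 (parse_time_str s).2
      let eb := time_to_minutes (parse_time_str e).1 (parse_time_str e).2
      if eb > sb then PySem.Set.update acc (PySem.List.pyRange (max sb startM) (min eb endM) 1) else acc
  | _, _ => acc

def blockedMinutes (startM endM : Int) (blackouts : List (List (String × String))) : PySem.Set Int :=
  blackouts.foldl (blockedStep startM endM) PySem.Set.empty

def build_time_slots_alt (workday_start : String) (workday_end : String) (blackouts : List (List (String × String))) : List String :=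
  let s0 := time_to_minutes (parse_time_str workday_start).1 (parse_time_str workday_start).2
  let e0 := time_to_minutes (parse_time_str workday_end).1 (parse_time_str workday_end).2
  let startM := if e0 ≤ s0 then 8 * 60 else s0
  let endM := if e0 ≤ s0 then 17 * 60 else e0
  let blocked := blockedMinutes startM endM blackouts
  ((PySem.List.pyRange startM endM TIME_SLOT_MINUTES).filter
      (fun m => !(PySem.Set.contains blocked m))).map minutes_to_str

-- ===== PRECONDITION & SPEC =====
def Spec_build_time_slots (workday_start : String) (workday_end : String) (blackouts : List (List (String × String))) (out : List String) : Prop := out = build_time_slots_alt workday_start workday_end blackouts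
instance (workday_start : String) (workday_end : String) (blackouts : List (List (String × String))) (out : List String) : Decidable (Spec_build_time_slots workday_start workday_end blackouts out) := by unfold Spec_build_time_slots; infer_instance

-- ===== CLAIM (what is proved, stated in full; the proofs are below) =====
def Claim_equal_build_time_slots : Prop := ∀ (workday_start : String) (workday_end : String) (blackouts : List (List (String × String))), Dom_build_time_slots workday_start workday_end blackouts → Spec_build_time_slots workday_start workday_end blackouts (build_time_slots workday_start workday_end blackouts)

-- ===== LEMMAS AND PROOFS =====

theorem pyRange_ten_nil (a b : Int) (h : b ≤ a) : PySem.List.pyRange a b 10 = [] := by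
  rw [PySem.List.pyRange_of_pos a b (by norm_num)]
  simp [if_neg (by omega : ¬ a < b)]

theorem pyRange_ten_cons (a b : Int) (h : a < b) :
    PySem.List.pyRange a b 10 = a :: PySem.List.pyRange (a + 10) b 10 := by
  rw [PySem.List.pyRange_of_pos a b (by norm_num), PySem.List.pyRange_of_pos (a + 10) b (by norm_num)]
  by_cases h2 : a + 10 < b
  · rw [if_pos h, if_pos h2]
    have hN : ((b - a + 10 - 1) / 10).toNat = ((b - (a + 10) + 10 - 1) / 10).toNat + 1 := by omega
    rw [hN, List.range_succ_eq_map]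
    simp only [List.map_cons, List.map_map]
    congr 1
    · simp
    · apply List.map_congr_left
      intro k _
      simp only [Function.comp_apply]
      push_cast
      ring
  · rw [if_pos h, if_neg h2]
    have hN : ((b - a + 10 - 1) / 10).toNat = 1 := by omega
    rw [hN]
    simp

theorem blackoutStep_append (acc : List (Int × Int)) (b : List (String × String)) :
    blackoutStep acc b = acc ++ blackoutStep [] b := by
  unfold blackoutStep
  cases b.lookup "start" <;> cases b.lookup "end" <;> simp
  split_ifs <;> simp

theorem blackoutRanges_fold_acc (bl : List (List (String × String))) (acc : List (Int × Int)) :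
    bl.foldl blackoutStep acc = acc ++ bl.foldl blackoutStep [] := by
  induction bl generalizing acc with
  | nil => simp
  | cons b bl ih =>
    simp only [List.foldl_cons]
    rw [ih (blackoutStep acc b), ih (blackoutStep [] b), blackoutStep_append acc b,
      List.append_assoc]

theorem mem_blockedStep (startM endM : Int) (acc : PySem.Set Int) (b : List (String × String)) (m : Int) :
    m ∈ blockedStep startM endM acc b ↔
      m ∈ acc ∨ ∃ r ∈ blackoutStep [] b, max r.1 startM ≤ m ∧ m < min r.2 endM := by
  unfold blockedStep blackoutStep
  cases b.lookup "start" <;> cases b.lookup "end" <;> simp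
  split_ifs with h1 h2
  · simp
    tauto
  · rw [PySem.Set.mem_update]
    simp [PySem.List.mem_pyRange_one]
    tauto
  · simp
    tauto

theorem mem_blockedMinutes_aux (bl : List (List (String × String))) (startM endM : Int)
    (acc : PySem.Set Int) (m : Int) :
    m ∈ bl.foldl (blockedStep startM endM) acc ↔
      m ∈ acc ∨ ∃ r ∈ bl.foldl blackoutStep [], max r.1 startM ≤ m ∧ m < min r.2 endM := by
  induction bl generalizing acc with
  | nil => simp
  | cons b bl ih =>
    simp only [List.foldl_cons]
    rw [ih (blockedStep startM endM acc b), mem_blockedStep,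
      blackoutRanges_fold_acc bl (blackoutStep [] b)]
    constructor
    · rintro ((h | ⟨r, hr, h⟩) | ⟨r, hr, h⟩)
      · exact Or.inl h
      · exact Or.inr ⟨r, by simp [hr], h⟩
      · exact Or.inr ⟨r, by simp [hr], h⟩
    · rintro (h | ⟨r, hr, h⟩)
      · exact Or.inl (Or.inl h)
      · rcases List.mem_append.mp hr with hr | hr
        · exact Or.inl (Or.inr ⟨r, hr, h⟩)
        · exact Or.inr ⟨r, hr, h⟩

theorem in_blackout_eq_contains (bl : List (List (String × String))) (startM endM m : Int)
    (hm1 : startM ≤ m) (hm2 : m < endM) :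
    in_blackout (blackoutRanges bl) m = PySem.Set.contains (blockedMinutes startM endM bl) m := by
  have hA : in_blackout (blackoutRanges bl) m = true ↔
      ∃ r ∈ blackoutRanges bl, r.1 ≤ m ∧ m < r.2 := by
    simp [in_blackout, List.any_eq_true]
  have hB : PySem.Set.contains (blockedMinutes startM endM bl) m = true ↔
      ∃ r ∈ blackoutRanges bl, r.1 ≤ m ∧ m < r.2 := by
    rw [PySem.Set.contains_iff, blockedMinutes, mem_blockedMinutes_aux]
    constructor
    · rintro (h | ⟨r, hr, h⟩)
      · simp [PySem.Set.empty] at h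
      · exact ⟨r, hr, by omega⟩
    · rintro ⟨r, hr, h⟩
      exact Or.inr ⟨r, hr, by omega⟩
  rw [Bool.eq_iff_iff, hA, hB]

theorem slotLoop_eq (ranges : List (Int × Int)) (endM : Int) (current : Int) (slots : List String) :
    slotLoop ranges endM current slots =
      slots ++ ((PySem.List.pyRange current endM 10).filter
        (fun m => !in_blackout ranges m)).map minutes_to_str := by
  by_cases h : current < endM
  · rw [slotLoop, dif_pos h, slotLoop_eq, pyRange_ten_cons current endM h]
    simp only [List.filter_cons]
    cases hb : in_blackout ranges current <;> simp [TIME_SLOT_MINUTES]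
  · rw [slotLoop, dif_neg h, pyRange_ten_nil current endM (by omega)]
    simp
termination_by (endM - current).toNat
decreasing_by simp only [TIME_SLOT_MINUTES] at *; omega

theorem build_alt_eq (S E : Int) (bl : List (List (String × String))) :
    ((PySem.List.pyRange S E 10).filter
        (fun m => !(PySem.Set.contains (blockedMinutes S E bl) m))).map minutes_to_str
      = slotLoop (blackoutRanges bl) E S [] := by
  rw [slotLoop_eq, List.nil_append]
  congr 1
  apply List.filter_congr
  intro m hm
  have hmem := (PySem.List.mem_pyRange_iff_of_pos (by norm_num : (0:Int) < 10) m).mp hm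
  rw [in_blackout_eq_contains bl S E m (by omega) (by omega)]

theorem build_eq (workday_start workday_end : String) (blackouts : List (List (String × String))) :
    build_time_slots workday_start workday_end blackouts
      = build_time_slots_alt workday_start workday_end blackouts := by
  simp only [build_time_slots, build_time_slots_alt, TIME_SLOT_MINUTES]
  split_ifs with hc
  · rw [build_alt_eq (8 * 60) (17 * 60) blackouts]
    norm_num [time_to_minutes]
  · rw [build_alt_eq]

-- ===== VERDICT (by name: the statement is the Claim_ definition above) =====
theorem build_time_slots_spec : Claim_equal_build_time_slots := by
  intro workday_start workday_end blackouts _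
  unfold Spec_build_time_slots
  exact build_eq workday_start workday_end blackouts
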